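-- pv_equiv track=rewrite | github.com/arspaper/oldSchoolwork | games13.02.py | func1_1
-- ===== SOURCE A (Python) =====
-- def func1_1(a, s, p):  # 2 piles, +3, *2, >= 375, vanya first win, bad case petya, min s
--     if p == 3:
--         if a + s >= 375:
--             return True
--         else:
--             return False
--     return func1_1(a + 3, s, p + 1) or func1_1(a, s + 3, p + 1)\
--         or func1_1(a * 2, s, p + 1) or func1_1(a, s * 2, p + 1)
-- ===== SOURCE B (Python) =====
-- def best(x, k):
--     # greatest value a single pile starting at x can reach after k moves (+3 or *2):
--     # (x + 3*j) * 2**(k-j) (j adds, then doubles) grows in j while x + 3*j <= 3 and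
--     # shrinks afterwards, so the max is at the smallest j in [0, k] with x + 3*j >= 3
--     j = min(k, max(0, -((x - 3) // 3)))
--     return (x + 3 * j) * 2 ** (k - j)
--
--
-- def func1_1(a, s, p):
--     # The two piles evolve independently: a game line is k moves on pile a and
--     # n-k moves on pile s, and only the best reachable value of each pile matters,
--     # so test the best final sum over all splits instead of the 4^n game tree.
--     n = 3 - p
--     return max(best(a, k) + best(s, n - k) for k in range(n + 1)) >= 375
-- ===== Notes on version B (the rewrite author's own statement) =====
-- stated objective: faster
-- what changed: Instead of recursing over the full 4^n tree of interleaved moves (n = 3 - p), B exploits that the two piles evolve independently and that only the best reachable value of each pile matters: it computes best(x, k), the greatest single-pile value after k moves, and tests max over splits k of best(a, k) + best(s, n - k) >= 375.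
-- outside the precondition, e.g. on func1_1(6, 5, -3679): A returns True, B returns True
import Mathlib
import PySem

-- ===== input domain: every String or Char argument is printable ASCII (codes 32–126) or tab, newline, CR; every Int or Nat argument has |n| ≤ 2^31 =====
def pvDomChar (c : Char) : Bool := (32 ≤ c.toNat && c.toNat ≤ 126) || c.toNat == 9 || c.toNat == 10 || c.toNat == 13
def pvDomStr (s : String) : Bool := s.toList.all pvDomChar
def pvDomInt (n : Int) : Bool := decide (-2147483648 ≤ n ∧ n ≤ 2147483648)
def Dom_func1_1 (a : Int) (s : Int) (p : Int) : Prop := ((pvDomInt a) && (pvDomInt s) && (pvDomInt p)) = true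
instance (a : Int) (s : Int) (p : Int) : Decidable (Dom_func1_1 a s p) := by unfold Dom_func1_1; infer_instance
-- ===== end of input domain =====

-- B replaces A's 4^(3-p) game-tree recursion by the best reachable per-pile value
-- (adds before doubles) for each split of the moves between the two independent piles
-- (objective: faster).


-- ===== PORT A =====
-- A's recursion on p is replayed with fuel (3 - p).toNat; inside Pre_ (p ≤ 3) the
-- fuel is exactly the remaining recursion depth, so the port is exact there.
def func1_1Go : Nat → Int → Int → Int → Bool
  | fuel, a, s, p =>
    if p = 3 then decide (a + s ≥ 375)
    else match fuel with
      | 0 => false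
      | f + 1 =>
        func1_1Go f (a + 3) s (p + 1) || func1_1Go f a (s + 3) (p + 1) ||
        func1_1Go f (a * 2) s (p + 1) || func1_1Go f a (s * 2) (p + 1)

def func1_1 (a : Int) (s : Int) (p : Int) : Bool :=
  func1_1Go (3 - p).toNat a s p

-- ===== PORT B =====
-- best(x, k): j = min(k, max(0, -((x-3)//3))) then (x + 3*j) * 2**(k-j);
-- Python's // is floor division = PySem.Int.floordiv; 2**(k-j) has k - j ≥ 0
-- whenever k ≥ 0 (best is only called with k ≥ 0), so `.toNat` there is exact.
def bestB (x : Int) (k : Int) : Int :=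
  let j := min k (max 0 (-(PySem.Int.floordiv (x - 3) 3)))
  (x + 3 * j) * 2 ^ (k - j).toNat

-- max(…) over range(n+1) is empty only when p > 3 (outside Pre_), where Python
-- raises ValueError and the port's `.getD 0` default is never compared.
def func1_1_alt (a : Int) (s : Int) (p : Int) : Bool :=
  decide ((PySem.List.max?
      ((PySem.List.pyRange 0 (3 - p + 1) 1).map fun k =>
        bestB a k + bestB s (3 - p - k))
      (fun v => v)).getD 0 ≥ 375)

-- ===== PRECONDITION & SPEC =====
-- Pre_ excludes p > 3, where A recurses forever (RecursionError), and p < -900,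
-- where A's recursion depth 3 - p exceeds CPython's default recursion limit
-- (RecursionError); with a raised limit A can still return on some such deep
-- inputs (when its DFS hits an early True leaf), and B agrees there (see cites).
def Pre_func1_1 (a : Int) (s : Int) (p : Int) : Prop := -900 ≤ p ∧ p ≤ 3
instance (a : Int) (s : Int) (p : Int) : Decidable (Pre_func1_1 a s p) := by
  unfold Pre_func1_1; infer_instance

def pvWitness_func1_1 : Int × Int × Int := (100, 50, 1)

def Spec_func1_1 (a : Int) (s : Int) (p : Int) (out : Bool) : Prop := out = func1_1_alt a s p
instance (a : Int) (s : Int) (p : Int) (out : Bool) : Decidable (Spec_func1_1 a s p out) := by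
  unfold Spec_func1_1; infer_instance

-- ===== CLAIM (what is proved, stated in full; the proofs are below) =====
def Claim_equal_func1_1 : Prop :=
  ∀ (a : Int) (s : Int) (p : Int), Dom_func1_1 a s p → Pre_func1_1 a s p →
    Spec_func1_1 a s p (func1_1 a s p)

-- ===== LEMMAS AND PROOFS =====

-- A's recursion with the carried player counter erased (p determined by the fuel).
def goA : Nat → Int → Int → Bool
  | 0, a, s => decide (a + s ≥ 375)
  | n + 1, a, s =>
    goA n (a + 3) s || goA n a (s + 3) || goA n (a * 2) s || goA n a (s * 2)

lemma func1_1Go_eq_goA :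
    ∀ (n : Nat) (a s p : Int), p + (n : Int) = 3 → func1_1Go n a s p = goA n a s := by
  intro n
  induction n with
  | zero =>
    intro a s p hp
    have : p = 3 := by omega
    subst this
    simp [func1_1Go, goA]
  | succ n ih =>
    intro a s p hp
    have hne : p ≠ 3 := by omega
    have hrec : (p + 1) + (n : Int) = 3 := by push_cast at hp ⊢; omega
    simp only [func1_1Go, if_neg hne, goA,
      ih (a + 3) s (p + 1) hrec, ih a (s + 3) (p + 1) hrec,
      ih (a * 2) s (p + 1) hrec, ih a (s * 2) (p + 1) hrec]

-- all values a single pile starting at x can take after k moves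
def reachP (x : Int) : Nat → List Int
  | 0 => [x]
  | k + 1 => reachP (x + 3) k ++ reachP (2 * x) k

-- the proposition both programs decide
def ReachP (m : Nat) (a s : Int) : Prop :=
  ∃ k x y, k ≤ m ∧ x ∈ reachP a k ∧ y ∈ reachP s (m - k) ∧ x + y ≥ 375

lemma goA_iff : ∀ (n : Nat) (a s : Int), goA n a s = true ↔ ReachP n a s := by
  intro n
  induction n with
  | zero =>
    intro a s
    simp only [goA, decide_eq_true_eq, ReachP]
    constructor
    · intro h
      exact ⟨0, a, s, le_refl _, by simp [reachP], by simp [reachP], h⟩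
    · rintro ⟨k, x, y, hk, hx, hy, h⟩
      interval_cases k
      simp only [reachP, List.mem_singleton] at hx hy
      subst hx; subst hy; exact h
  | succ n ih =>
    intro a s
    simp only [goA, Bool.or_eq_true, ih]
    constructor
    · rintro (((⟨k, x, y, hk, hx, hy, h⟩ | ⟨k, x, y, hk, hx, hy, h⟩) |
              ⟨k, x, y, hk, hx, hy, h⟩) | ⟨k, x, y, hk, hx, hy, h⟩)
      · -- first move +3 on pile a : length-(k+1) pile-a sequence
        exact ⟨k + 1, x, y, by omega,
          by simpa [reachP] using Or.inl hx,
          by simpa [Nat.succ_sub_succ] using hy, h⟩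
      · -- first move +3 on pile s : same split k, pile-s sequence one longer
        refine ⟨k, x, y, by omega, hx, ?_, h⟩
        have : n + 1 - k = (n - k) + 1 := by omega
        rw [this]; exact List.mem_append_left _ hy
      · -- first move *2 on pile a
        have hx' : x ∈ reachP (2 * a) k := by rwa [show a * 2 = 2 * a from by ring] at hx
        exact ⟨k + 1, x, y, by omega,
          by simpa [reachP] using Or.inr hx',
          by simpa [Nat.succ_sub_succ] using hy, h⟩
      · -- first move *2 on pile s
        have hy' : y ∈ reachP (2 * s) (n - k) := by rwa [show s * 2 = 2 * s from by ring] at hy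
        refine ⟨k, x, y, by omega, hx, ?_, h⟩
        have : n + 1 - k = (n - k) + 1 := by omega
        rw [this]; exact List.mem_append_right _ hy'
    · rintro ⟨k, x, y, hk, hx, hy, h⟩
      match k, hk with
      | 0, _ =>
        -- no pile-a move: y's sequence on pile s has length n+1, split on its first move
        simp only [reachP, List.mem_singleton] at hx
        simp only [reachP, List.mem_append] at hy
        rcases hy with hy | hy
        · exact Or.inl (Or.inl (Or.inr ⟨0, x, y, by omega, by simp [reachP, hx], hy, h⟩))
        · have hy' : y ∈ reachP (s * 2) n := by rwa [show (2:Int) * s = s * 2 from by ring] at hy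
          exact Or.inr ⟨0, x, y, by omega, by simp [reachP, hx], hy', h⟩
      | k + 1, hk =>
        -- split x's pile-a sequence on its first move
        simp only [reachP, List.mem_append] at hx
        have hy' : y ∈ reachP s (n - k) := by simpa [Nat.succ_sub_succ] using hy
        rcases hx with hx | hx
        · exact Or.inl (Or.inl (Or.inl ⟨k, x, y, by omega, hx, hy', h⟩))
        · have hx' : x ∈ reachP (a * 2) k := by rwa [show (2:Int) * a = a * 2 from by ring] at hx
          exact Or.inl (Or.inr ⟨k, x, y, by omega, hx', hy', h⟩)

-- generic: the max over a mapped integer range is attained and dominates every term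
lemma max?_map_pyRange_spec (m : Int) (hm : 0 ≤ m) (f : Int → Int) :
    (∃ j, 0 ≤ j ∧ j ≤ m ∧
      (PySem.List.max? ((PySem.List.pyRange 0 (m + 1) 1).map f) (fun v => v)).getD 0 = f j) ∧
    (∀ j, 0 ≤ j → j ≤ m →
      f j ≤ (PySem.List.max? ((PySem.List.pyRange 0 (m + 1) 1).map f) (fun v => v)).getD 0) := by
  have h0 : (0 : Int) ∈ PySem.List.pyRange 0 (m + 1) 1 :=
    (PySem.List.mem_pyRange_one).mpr ⟨le_refl 0, by omega⟩
  have hne : ((PySem.List.pyRange 0 (m + 1) 1).map f) ≠ [] := by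
    simp only [ne_eq, List.map_eq_nil_iff]
    intro h; rw [h] at h0; exact (List.not_mem_nil) h0
  obtain ⟨v, hv⟩ : ∃ v, PySem.List.max?
      ((PySem.List.pyRange 0 (m + 1) 1).map f) (fun v => v) = some v := by
    cases hmx : PySem.List.max? ((PySem.List.pyRange 0 (m + 1) 1).map f) (fun v => v) with
    | none => exact absurd ((PySem.List.max?_eq_none_iff _ _).mp hmx) hne
    | some v => exact ⟨v, rfl⟩
  rw [hv]
  simp only [Option.getD_some]
  constructor
  · have hvmem := PySem.List.max?_mem hv
    simp only [List.mem_map] at hvmem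
    obtain ⟨j, hjmem, hjv⟩ := hvmem
    obtain ⟨hj0, hj1⟩ := (PySem.List.mem_pyRange_one).mp hjmem
    exact ⟨j, hj0, by omega, hjv.symm⟩
  · intro j hj0 hj1
    have hjmem : j ∈ PySem.List.pyRange 0 (m + 1) 1 :=
      (PySem.List.mem_pyRange_one).mpr ⟨hj0, by omega⟩
    exact PySem.List.max?_isMax hv _ (List.mem_map_of_mem hjmem)

-- the recursive best-value function (A's per-pile optimum)
def recBest (x : Int) : Nat → Int
  | 0 => x
  | k + 1 => max (recBest (x + 3) k) (recBest (2 * x) k)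

lemma recBest_mem : ∀ (k : Nat) (x : Int), recBest x k ∈ reachP x k := by
  intro k
  induction k with
  | zero => intro x; simp [recBest, reachP]
  | succ k ih =>
    intro x
    simp only [recBest, reachP, List.mem_append]
    rcases max_choice (recBest (x + 3) k) (recBest (2 * x) k) with h | h
    · rw [h]; exact Or.inl (ih (x + 3))
    · rw [h]; exact Or.inr (ih (2 * x))

lemma le_recBest : ∀ (k : Nat) (x y : Int), y ∈ reachP x k → y ≤ recBest x k := by
  intro k
  induction k with
  | zero => intro x y hy; simp only [reachP, List.mem_singleton] at hy; simp [recBest, hy]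
  | succ k ih =>
    intro x y hy
    simp only [reachP, List.mem_append] at hy
    simp only [recBest, le_max_iff]
    rcases hy with hy | hy
    · exact Or.inl (ih _ _ hy)
    · exact Or.inr (ih _ _ hy)

-- j additions of 3 followed by k - j doublings is an actual move sequence
lemma adds_then_doubles_mem :
    ∀ (k j : Nat) (x : Int), j ≤ k → (x + 3 * j) * 2 ^ (k - j) ∈ reachP x k := by
  intro k
  induction k with
  | zero =>
    intro j x hj
    interval_cases j
    simp [reachP]
  | succ k ih =>
    intro j x hj
    match j with
    | 0 =>
      have h := ih 0 (2 * x) (Nat.zero_le k)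
      simp only [reachP, List.mem_append]
      refine Or.inr ?_
      have : (x + 3 * (0:Nat)) * 2 ^ (k + 1 - 0) = (2 * x + 3 * (0:Nat)) * 2 ^ (k - 0) := by
        simp [pow_succ]; ring
      rw [this]; exact h
    | j + 1 =>
      have h := ih j (x + 3) (by omega)
      simp only [reachP, List.mem_append]
      refine Or.inl ?_
      have : (x + 3 * ((j:Nat) + 1 : Nat)) * 2 ^ (k + 1 - (j + 1)) =
          ((x + 3) + 3 * (j:Nat)) * 2 ^ (k - j) := by
        rw [Nat.succ_sub_succ]; push_cast; ring
      rw [this]; exact h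

-- the adds-then-doubles term with j additions
def tterm (x : Int) (k j : Nat) : Int := (x + 3 * (j : Nat)) * 2 ^ (k - j)

lemma tterm_step_up (x : Int) (k j : Nat) (hj : j < k) (h : x + 3 * (j : Nat) ≤ 3) :
    tterm x k j ≤ tterm x k (j + 1) := by
  unfold tterm
  have hk : k - j = (k - (j + 1)) + 1 := by omega
  rw [hk, pow_succ]
  have hp : (0:Int) ≤ 2 ^ (k - (j + 1)) := by positivity
  push_cast
  nlinarith

lemma tterm_step_down (x : Int) (k j : Nat) (hj : j < k) (h : 3 ≤ x + 3 * (j : Nat)) :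
    tterm x k (j + 1) ≤ tterm x k j := by
  unfold tterm
  have hk : k - j = (k - (j + 1)) + 1 := by omega
  rw [hk, pow_succ]
  have hp : (0:Int) ≤ 2 ^ (k - (j + 1)) := by positivity
  push_cast
  nlinarith

-- bestB at a natural-number move count: attained term and upper bound
lemma bestB_spec (x : Int) (k : Nat) :
    (∃ j : Nat, j ≤ k ∧ bestB x (k : Int) = (x + 3 * j) * 2 ^ (k - j)) ∧
    (∀ j : Nat, j ≤ k → (x + 3 * j) * 2 ^ (k - j) ≤ bestB x (k : Int)) := by
  set q : Int := -(PySem.Int.floordiv (x - 3) 3) with hqdef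
  have hq : (q - 1) * 3 < 3 - x ∧ 3 - x ≤ q * 3 := by
    have hx3 : x - 3 = -(3 - x) := by ring
    refine (PySem.Int.neg_floordiv_neg_eq_iff_of_pos (a := 3 - x) (b := 3) (q := q)
      (by omega)).mp ?_
    rw [hqdef, hx3]
  set jI : Int := min (k : Int) (max 0 q) with hjI
  have hjI0 : 0 ≤ jI := le_min (Int.natCast_nonneg k) (le_max_left 0 q)
  have hjIk : jI ≤ (k : Int) := min_le_left _ _
  set jn : Nat := jI.toNat with hjn
  have hjncast : (jn : Int) = jI := by omega
  have hbest : bestB x (k : Int) = tterm x k jn := by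
    show (x + 3 * jI) * 2 ^ (((k : Int)) - jI).toNat = tterm x k jn
    rw [show ((k : Int) - jI).toNat = k - jn from by omega, ← hjncast]
    rfl
  -- below the optimum the term is still climbing
  have hlow : ∀ i : Nat, (i : Int) < jI → x + 3 * (i : Nat) ≤ 3 := by
    intro i hi
    have h1 : (i : Int) < max 0 q := lt_of_lt_of_le hi (min_le_right _ _)
    have h2 : (i : Int) < q := by
      rcases le_or_gt q 0 with h | h
      · omega
      · omega
    omega
  -- at or above the optimum (when it is not capped at k) the term is falling
  have hhigh : ∀ i : Nat, jI ≤ (i : Int) → jI < (k : Int) → 3 ≤ x + 3 * (i : Nat) := by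
    intro i hi hcap
    have h1 : max 0 q ≤ jI := by
      rcases min_choice ((k : Int)) (max 0 q) with h | h
      · omega
      · omega
    have h2 : q ≤ (i : Int) := le_trans (le_trans (le_max_right 0 q) h1) hi
    omega
  have climb : ∀ d j : Nat, j + d = jn → tterm x k j ≤ tterm x k jn := by
    intro d
    induction d with
    | zero => intro j hj; rw [show j = jn from by omega]
    | succ d ih =>
      intro j hj
      refine le_trans (tterm_step_up x k j (by omega) (hlow j (by omega))) (ih (j + 1) (by omega))
  have descend : ∀ d j : Nat, jn + d = j → j ≤ k → tterm x k j ≤ tterm x k jn := by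
    intro d
    induction d with
    | zero => intro j hj _; rw [show j = jn from by omega]
    | succ d ih =>
      intro j hj hjk
      have hcap : jI < (k : Int) := by omega
      have hstep := tterm_step_down x k (jn + d) (by omega) (hhigh (jn + d) (by omega) hcap)
      exact le_trans (by rw [show j = (jn + d) + 1 from by omega]; exact hstep) (ih (jn + d) rfl (by omega))
  constructor
  · exact ⟨jn, by omega, hbest⟩
  · intro j hj
    have : tterm x k j ≤ tterm x k jn := by
      rcases le_or_gt j jn with h | h
      · exact climb (jn - j) j (by omega)
      · exact descend (j - jn) j (by omega) hj
    rw [hbest]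
    exact this

-- the recursive optimum equals B's adds-before-doubles formula
lemma recBest_eq_bestB : ∀ (k : Nat) (x : Int), recBest x k = bestB x (k : Int) := by
  intro k
  induction k with
  | zero =>
    intro x
    obtain ⟨⟨j, hj, hv⟩, hub⟩ := bestB_spec x 0
    interval_cases j
    simpa [recBest] using hv.symm
  | succ k ih =>
    intro x
    apply le_antisymm
    · -- recBest is one reachable value, and every reachable value is ≤ some term
      obtain ⟨_, hub⟩ := bestB_spec x (k + 1)
      -- show every element of reachP x (k+1) is ≤ bestB, applied to recBest itself
      simp only [recBest]
      apply max_le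
      · -- terms of bestB (x+3) k re-index as terms j+1 of bestB x (k+1)
        rw [ih (x + 3)]
        obtain ⟨⟨j, hj, hv⟩, _⟩ := bestB_spec (x + 3) k
        rw [hv]
        have : ((x + 3) + 3 * j) * 2 ^ (k - j) = (x + 3 * (j + 1 : Nat)) * 2 ^ (k + 1 - (j + 1)) := by
          rw [Nat.succ_sub_succ]; push_cast; ring
        rw [this]
        exact hub (j + 1) (by omega)
      · -- each term of bestB (2x) k is dominated by term j of bestB x (k+1)
        rw [ih (2 * x)]
        obtain ⟨⟨j, hj, hv⟩, _⟩ := bestB_spec (2 * x) k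
        rw [hv]
        refine le_trans ?_ (hub j (by omega))
        have hpow : (2:Int) ^ (k + 1 - j) = 2 * 2 ^ (k - j) := by
          rw [show k + 1 - j = (k - j) + 1 from by omega, pow_succ]; ring
        rw [hpow]
        have h2 : (2 * x + 3 * (j:Int)) ≤ 2 * (x + 3 * (j:Int)) := by
          have : (0:Int) ≤ 3 * (j:Int) := by positivity
          omega
        calc (2 * x + 3 * (j:Int)) * 2 ^ (k - j)
            ≤ (2 * (x + 3 * (j:Int))) * 2 ^ (k - j) := by
              apply mul_le_mul_of_nonneg_right h2 (by positivity)
          _ = (x + 3 * (j:Int)) * (2 * 2 ^ (k - j)) := by ring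
    · -- bestB's attained term is an actual move sequence, hence ≤ recBest
      obtain ⟨⟨j, hj, hv⟩, _⟩ := bestB_spec x (k + 1)
      rw [hv]
      exact le_recBest (k + 1) x _ (adds_then_doubles_mem (k + 1) j x hj)

lemma reachP_iff_best (m : Nat) (a s : Int) :
    ReachP m a s ↔ ∃ k, k ≤ m ∧ 375 ≤ recBest a k + recBest s (m - k) := by
  constructor
  · rintro ⟨k, x, y, hk, hx, hy, h⟩
    exact ⟨k, hk, le_trans h (add_le_add (le_recBest _ _ _ hx) (le_recBest _ _ _ hy))⟩
  · rintro ⟨k, hk, h⟩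
    exact ⟨k, recBest a k, recBest s (m - k), hk, recBest_mem _ _, recBest_mem _ _, h⟩

lemma alt_iff_best (m : Int) (hm : 0 ≤ m) (a s : Int) :
    (decide ((PySem.List.max?
      ((PySem.List.pyRange 0 (m + 1) 1).map fun k => bestB a k + bestB s (m - k))
      (fun v => v)).getD 0 ≥ 375) = true)
    ↔ ∃ k, k ≤ m.toNat ∧ 375 ≤ recBest a k + recBest s (m.toNat - k) := by
  obtain ⟨hex, hub⟩ := max?_map_pyRange_spec m hm (fun k => bestB a k + bestB s (m - k))
  simp only [decide_eq_true_eq]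
  constructor
  · intro hge
    obtain ⟨k, hk0, hk1, hkv⟩ := hex
    rw [hkv] at hge
    refine ⟨k.toNat, by omega, ?_⟩
    have h1 : ((k.toNat : Int)) = k := by omega
    have h2 : ((m - k).toNat : Int) = m - k := by omega
    rw [recBest_eq_bestB, recBest_eq_bestB, h1,
      show m.toNat - k.toNat = (m - k).toNat from by omega, h2]
    exact hge
  · rintro ⟨k, hk, hge⟩
    refine le_trans ?_ (hub (k : Int) (Int.natCast_nonneg k) (by omega))
    rw [recBest_eq_bestB, recBest_eq_bestB] at hge
    have h2 : ((m.toNat - k : Nat) : Int) = m - (k : Int) := by omega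
    rw [h2] at hge
    exact hge

-- ===== VERDICT (by name: the statement is the Claim_ definition above) =====
theorem func1_1_spec : Claim_equal_func1_1 := by
  intro a s p _ hpre
  unfold Pre_func1_1 at hpre
  unfold Spec_func1_1 func1_1 func1_1_alt
  rw [func1_1Go_eq_goA ((3 - p).toNat) a s p (by omega)]
  apply Bool.eq_iff_iff.mpr
  rw [goA_iff, reachP_iff_best, alt_iff_best (3 - p) (by omega)]
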